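-- pv_equiv track=rewrite | github.com/darrencroton/research-assistant | src/re_ass/note_manager.py | _section_bounds
-- ===== SOURCE A (Python) =====
-- def _find_heading_line(lines: list[str], heading: str) -> int | None:
--     for index, line in enumerate(lines):
--         if line.rstrip("\n") == heading:
--             return index
--     return None
--
-- def _is_top_level_heading(line: str) -> bool:
--     return line.startswith("## ")
--
-- def _section_bounds(lines: list[str], heading: str) -> tuple[int, int] | None:
--     heading_index = _find_heading_line(lines, heading)
--     if heading_index is None:
--         return None
--
--     next_heading_index: int | None = None
--     for index in range(heading_index + 1, len(lines)):
--         if _is_top_level_heading(lines[index]):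
--             next_heading_index = index
--             break
--
--     if next_heading_index is None:
--         return heading_index, len(lines)
--
--     end_index = next_heading_index
--     probe = next_heading_index - 1
--     while probe > heading_index and not lines[probe].strip():
--         probe -= 1
--     if probe > heading_index and lines[probe].strip() == "---":
--         end_index = probe
--     else:
--         while end_index > heading_index + 1 and not lines[end_index - 1].strip():
--             end_index -= 1
--
--     return heading_index, end_index
-- ===== SOURCE B (Python) =====
-- def _section_bounds(lines, heading):
--     matches = [i for i, line in enumerate(lines) if line.rstrip("\n") == heading]
--     if not matches:
--         return None
--     hi = matches[0]
--     rest = lines[hi + 1:]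
--     breaks = [j for j, line in enumerate(rest) if line.startswith("## ")]
--     if not breaks:
--         return hi, len(lines)
--     body = rest[:breaks[0]]
--     while body and not body[-1].strip():
--         body.pop()
--     if body and body[-1].strip() == "---":
--         body.pop()
--     return hi, hi + 1 + len(body)
-- ===== Notes on version B (the rewrite author's own statement) =====
-- stated objective: simpler
-- what changed: Replaces the two backward while-probes over absolute indices with a forward slice of the section body followed by trim-trailing-blanks and a single conditional drop of a closing '---' line; heading and next-heading searches become first-match comprehensions.
import Mathlib
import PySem

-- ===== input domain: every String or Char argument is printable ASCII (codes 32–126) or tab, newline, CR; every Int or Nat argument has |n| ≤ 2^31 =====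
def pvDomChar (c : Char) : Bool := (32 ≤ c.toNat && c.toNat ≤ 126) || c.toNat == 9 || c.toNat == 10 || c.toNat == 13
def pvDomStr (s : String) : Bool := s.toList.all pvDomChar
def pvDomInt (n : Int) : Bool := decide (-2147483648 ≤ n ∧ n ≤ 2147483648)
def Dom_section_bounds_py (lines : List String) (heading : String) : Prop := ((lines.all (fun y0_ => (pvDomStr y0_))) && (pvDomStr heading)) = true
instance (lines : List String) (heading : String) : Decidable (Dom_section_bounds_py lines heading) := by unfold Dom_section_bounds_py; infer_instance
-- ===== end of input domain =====

-- B replaces A's two backward index while-probes with a forward slice of the section body,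
-- trimming trailing blank lines and conditionally dropping one closing '---' line (objective: simpler).

-- ===== PORT A =====
-- exact hand port of Python s.rstrip("\n"): drop trailing '\n' characters
def pyRstripNewline (s : String) : String :=
  String.mk ((s.toList.reverse.dropWhile (fun c => c == '\n')).reverse)

-- for index, line in enumerate(lines): if line.rstrip("\n") == heading: return index
def findHeadingLine (lines : List String) (heading : String) : Option Int :=
  (PySem.List.enumerate lines).findSome?
    (fun p => if pyRstripNewline p.2 == heading then some p.1 else none)

-- while probe > heading_index and not lines[probe].strip(): probe -= 1   (fuel only makes it total)
def probeLoop (lines : List String) (headingIndex : Int) (probe : Int) : Nat → Int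
  | 0 => probe
  | fuel + 1 =>
    if probe > headingIndex ∧ PySem.Str.strip (PySem.List.pyGetD lines probe "") == "" then
      probeLoop lines headingIndex (probe - 1) fuel
    else probe

-- while end_index > heading_index + 1 and not lines[end_index - 1].strip(): end_index -= 1
def endLoop (lines : List String) (headingIndex : Int) (endIndex : Int) : Nat → Int
  | 0 => endIndex
  | fuel + 1 =>
    if endIndex > headingIndex + 1 ∧ PySem.Str.strip (PySem.List.pyGetD lines (endIndex - 1) "") == "" then
      endLoop lines headingIndex (endIndex - 1) fuel
    else endIndex

def section_bounds_py (lines : List String) (heading : String) : Option (Int × Int) :=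
  match findHeadingLine lines heading with
  | none => none
  | some headingIndex =>
    let nextHeadingIndex : Option Int :=
      (PySem.List.pyRange (headingIndex + 1) lines.length 1).findSome?
        (fun index =>
          if PySem.Str.startswith (PySem.List.pyGetD lines index "") "## " then some index else none)
    match nextHeadingIndex with
    | none => some (headingIndex, (lines.length : Int))
    | some nhi =>
      let probe := probeLoop lines headingIndex (nhi - 1) lines.length
      if probe > headingIndex ∧ PySem.Str.strip (PySem.List.pyGetD lines probe "") == "---" then
        some (headingIndex, probe)
      else
        some (headingIndex, endLoop lines headingIndex nhi lines.length)

-- ===== PORT B =====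
def isBlankLine (s : String) : Bool := PySem.Str.strip s == ""

def section_bounds_py_alt (lines : List String) (heading : String) : Option (Int × Int) :=
  let hits := ((PySem.List.enumerate lines).filter
      (fun p => pyRstripNewline p.2 == heading)).map (fun p => p.1)
  match hits with
  | [] => none
  | hi :: _ =>
    let rest := PySem.List.slice lines (some (hi + 1)) none
    let breaks := ((PySem.List.enumerate rest).filter
        (fun p => PySem.Str.startswith p.2 "## ")).map (fun p => p.1)
    match breaks with
    | [] => some (hi, (lines.length : Int))
    | j :: _ =>
      let body := PySem.List.slice rest none (some j)
      -- while body and not body[-1].strip(): body.pop()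
      let trimmed := List.rdropWhile isBlankLine body
      -- if body and body[-1].strip() == "---": body.pop()
      let final :=
        match trimmed.getLast? with
        | some last => if PySem.Str.strip last == "---" then trimmed.dropLast else trimmed
        | none => trimmed
      some (hi, hi + 1 + (final.length : Int))

-- ===== PRECONDITION & SPEC =====
def Spec_section_bounds_py (lines : List String) (heading : String) (out : Option (Int × Int)) : Prop := out = section_bounds_py_alt lines heading
instance (lines : List String) (heading : String) (out : Option (Int × Int)) : Decidable (Spec_section_bounds_py lines heading out) := by unfold Spec_section_bounds_py; infer_instance

-- ===== CLAIM (what is proved, stated in full; the proofs are below) =====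
def Claim_equal_section_bounds_py : Prop := ∀ (lines : List String) (heading : String), Dom_section_bounds_py lines heading → Spec_section_bounds_py lines heading (section_bounds_py lines heading)

-- ===== LEMMAS AND PROOFS =====

lemma findSome?_ifP {α β : Type} (P : α → Bool) (f : α → β) (l : List α) :
    l.findSome? (fun a => if P a then some (f a) else none) = ((l.filter P).map f).head? := by
  induction l with
  | nil => simp
  | cons x xs ih =>
    by_cases h : P x <;> simp [List.findSome?_cons, h, ih]

lemma heads_shift (P : String → Bool) :
    ∀ (ys : List String) (s : Int),
      (((PySem.List.enumerate ys s).filter (fun p => P p.2)).map (fun p => p.1)).head?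
        = (ys.findIdx? P).map (fun k : Nat => s + (k : Int)) := by
  intro ys
  induction ys with
  | nil => intro s; simp [PySem.List.enumerate_nil]
  | cons y ys ih =>
    intro s
    rw [PySem.List.enumerate_cons]
    by_cases h : P y
    · simp [h, List.findIdx?_cons]
    · simp only [List.filter_cons, h, Bool.false_eq_true, if_false]
      rw [ih (s + 1)]
      simp only [List.findIdx?_cons, h, Bool.false_eq_true, if_false]
      cases List.findIdx? P ys with
      | none => simp
      | some k => simp; push_cast; ring

lemma findSome?_pyRange_break :
    ∀ (ys pre : List String),
      (PySem.List.pyRange ((pre.length : Int)) (((pre ++ ys).length : Int)) 1).findSome?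
        (fun index =>
          if PySem.Str.startswith (PySem.List.pyGetD (pre ++ ys) index "") "## " then some index else none)
      = (ys.findIdx? (fun l => PySem.Str.startswith l "## ")).map (fun k : Nat => (pre.length : Int) + (k : Int)) := by
  intro ys
  induction ys with
  | nil =>
    intro pre
    rw [PySem.List.pyRange_one_eq_nil (by simp)]
    simp
  | cons y ys ih =>
    intro pre
    rw [PySem.List.pyRange_one_cons (by simp)]
    rw [List.findSome?_cons]
    have hget : PySem.List.pyGetD (pre ++ y :: ys) ((pre.length : Int)) "" = y := by
      rw [PySem.List.pyGetD_natCast]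
      simp [List.getD]
    rw [hget]
    by_cases h : PySem.Str.startswith y "## "
    · rw [if_pos h]
      simp only [List.findIdx?_cons, h, if_true, Option.map_some]
      simp
    · simp only [h, Bool.false_eq_true, if_false]
      have hre : pre ++ y :: ys = (pre ++ [y]) ++ ys := by simp
      have hlen : (pre.length : Int) + 1 = ((pre ++ [y]).length : Int) := by simp
      rw [hre, hlen, ih (pre ++ [y])]
      simp only [List.findIdx?_cons, h, Bool.false_eq_true, if_false]
      cases List.findIdx? (fun l => PySem.Str.startswith l "## ") ys with
      | none => simp
      | some k => simp; push_cast; ring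

lemma probeLoop_eq (lines : List String) (hI t : Int)
    (h1 : hI ≤ t)
    (h4 : t = hI ∨ ¬ PySem.Str.strip (PySem.List.pyGetD lines t "") == "") :
    ∀ (fuel : Nat) (p : Int), t ≤ p →
      (∀ i : Int, t < i → i ≤ p → PySem.Str.strip (PySem.List.pyGetD lines i "") == "") →
      (p - t).toNat ≤ fuel →
      probeLoop lines hI p fuel = t := by
  intro fuel
  induction fuel with
  | zero =>
    intro p h2 h3 hf
    have : p = t := by omega
    simp [probeLoop, this]
  | succ fuel ih =>
    intro p h2 h3 hf
    rcases eq_or_lt_of_le h2 with he | hlt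
    · subst he
      unfold probeLoop
      rcases h4 with h4 | h4
      · rw [if_neg]; omega
      · rw [if_neg]; intro hc; exact h4 hc.2
    · unfold probeLoop
      rw [if_pos ⟨by omega, h3 p hlt le_rfl⟩]
      exact ih (p - 1) (by omega) (fun i hi1 hi2 => h3 i hi1 (by omega)) (by omega)

lemma endLoop_eq (lines : List String) (hI t : Int)
    (h1 : hI + 1 ≤ t)
    (h4 : t = hI + 1 ∨ ¬ PySem.Str.strip (PySem.List.pyGetD lines (t - 1) "") == "") :
    ∀ (fuel : Nat) (e : Int), t ≤ e →
      (∀ i : Int, t < i → i ≤ e → PySem.Str.strip (PySem.List.pyGetD lines (i - 1) "") == "") →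
      (e - t).toNat ≤ fuel →
      endLoop lines hI e fuel = t := by
  intro fuel
  induction fuel with
  | zero =>
    intro e h2 h3 hf
    have : e = t := by omega
    simp [endLoop, this]
  | succ fuel ih =>
    intro e h2 h3 hf
    rcases eq_or_lt_of_le h2 with he | hlt
    · subst he
      unfold endLoop
      rcases h4 with h4 | h4
      · rw [if_neg]; omega
      · rw [if_neg]; intro hc; exact h4 hc.2
    · unfold endLoop
      rw [if_pos ⟨by omega, h3 e hlt le_rfl⟩]
      exact ih (e - 1) (by omega) (fun i hi1 hi2 => h3 i hi1 (by omega)) (by omega)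

lemma main_eq (lines : List String) (heading : String) :
    section_bounds_py lines heading = section_bounds_py_alt lines heading := by
  unfold section_bounds_py section_bounds_py_alt findHeadingLine
  rw [findSome?_ifP]
  cases hh : ((PySem.List.enumerate lines).filter
      (fun p => pyRstripNewline p.2 == heading)).map (fun p => p.1) with
  | nil => simp
  | cons hi tl =>
    simp only [List.head?_cons]
    have hmem : hi ∈ ((PySem.List.enumerate lines).filter
        (fun p => pyRstripNewline p.2 == heading)).map (fun p => p.1) := by
      rw [hh]; exact List.mem_cons_self
    obtain ⟨q, hq, rfl⟩ := List.mem_map.1 hmem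
    obtain ⟨k, hk, rfl⟩ := (PySem.List.mem_enumerate_iff _ _ _).1 (List.mem_filter.1 hq).1
    simp only [zero_add]
    obtain ⟨pre, rest, rfl, hprelen⟩ : ∃ pre rest : List String,
        lines = pre ++ rest ∧ pre.length = k + 1 :=
      ⟨lines.take (k+1), lines.drop (k+1), (List.take_append_drop _ _).symm,
        by rw [List.length_take]; omega⟩
    have hcast : ((k : Int) + 1) = ((pre.length : Nat) : Int) := by omega
    rw [hcast, PySem.List.slice_from_natCast, List.drop_left, findSome?_pyRange_break rest pre]
    have hlen2 : (pre ++ rest).length = pre.length + rest.length := by simp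
    cases hf : rest.findIdx? (fun l => PySem.Str.startswith l "## ") with
    | none =>
      have hb : ((PySem.List.enumerate rest).filter
          (fun p => PySem.Str.startswith p.2 "## ")).map (fun p => p.1) = [] := by
        rw [← List.head?_eq_none_iff,
          heads_shift (fun l => PySem.Str.startswith l "## ") rest 0, hf]
        rfl
      rw [hb]
      simp
    | some j' =>
      obtain ⟨btl, hb⟩ : ∃ btl, ((PySem.List.enumerate rest).filter
          (fun p => PySem.Str.startswith p.2 "## ")).map (fun p => p.1) = ((0:Int) + j') :: btl := by
        have h0 := heads_shift (fun l => PySem.Str.startswith l "## ") rest 0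
        rw [hf] at h0
        exact List.head?_eq_some_iff.1 h0
      rw [hb]
      simp only [zero_add, Option.map_some]
      have hj : j' < rest.length := (List.findIdx?_eq_some_iff_findIdx_eq.1 hf).1
      rw [PySem.List.slice_to_natCast]
      have hbl : (rest.take j').length = j' := by rw [List.length_take]; omega
      have hdecomp : List.rdropWhile isBlankLine (rest.take j') ++
          List.rtakeWhile isBlankLine (rest.take j') = rest.take j' :=
        List.rdropWhile_append_rtakeWhile
      set trimmed := List.rdropWhile isBlankLine (rest.take j') with htrimmed
      set L := trimmed.length with hL
      have hLle : L ≤ j' := by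
        have h1 : trimmed.length ≤ (rest.take j').length := by
          rw [htrimmed]
          exact (List.rdropWhile_prefix _ _).length_le
        omega
      have haccess : ∀ k2 : Nat, k2 < rest.length →
          PySem.List.pyGetD (pre ++ rest) (((k + 1 + k2 : Nat) : Int)) "" = rest.getD k2 "" := by
        intro k2 hk2
        rw [PySem.List.pyGetD_natCast]
        unfold List.getD
        rw [List.getElem?_append_right (by omega)]
        congr 2
        omega
      have hblank : ∀ k2 : Nat, L ≤ k2 → k2 < j' →
          (PySem.Str.strip (rest.getD k2 "") == "") = true := by
        intro k2 h1 h2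
        have h3 : (rest.take j')[k2]? = some (rest.getD k2 "") := by
          rw [List.getElem?_take, if_pos h2, List.getElem?_eq_getElem (by omega : k2 < rest.length)]
          unfold List.getD
          rw [List.getElem?_eq_getElem (by omega : k2 < rest.length)]
          rfl
        rw [← hdecomp, List.getElem?_append_right (by omega)] at h3
        have h5 := List.mem_of_getElem? h3
        simpa [isBlankLine] using List.mem_rtakeWhile_imp h5
      have hne' : L ≠ 0 → trimmed ≠ [] := by
        intro h hnil
        rw [hL, hnil] at h
        simp at h
      have hglast : ∀ (hne : L ≠ 0), trimmed.getLast? = some (rest.getD (L-1) "") := by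
        intro hne
        rw [List.getLast?_eq_getElem?, ← hL]
        rw [show trimmed[L-1]? = (trimmed ++ List.rtakeWhile isBlankLine (rest.take j'))[L-1]?
            from (List.getElem?_append_left (by omega)).symm]
        rw [hdecomp, List.getElem?_take, if_pos (by omega), List.getElem?_eq_getElem (by omega : L-1 < rest.length)]
        unfold List.getD
        rw [List.getElem?_eq_getElem (by omega : L-1 < rest.length)]
        rfl
      have hlastnb : ∀ (hne : L ≠ 0), (PySem.Str.strip (rest.getD (L-1) "") == "") = false := by
        intro hne
        by_contra hc
        have hpx : isBlankLine (rest.getD (L-1) "") = true := by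
          simp only [Bool.not_eq_false] at hc
          exact hc
        obtain ⟨ys, hys⟩ := List.getLast?_eq_some_iff.1 (hglast hne)
        have hid : List.rdropWhile isBlankLine trimmed = trimmed := by
          rw [htrimmed]
          exact List.rdropWhile_idempotent _ _
        rw [hys, List.rdropWhile_concat_pos _ _ _ hpx] at hid
        have hlen3 := congrArg List.length hid
        have hlen4 : (List.rdropWhile isBlankLine ys).length ≤ ys.length :=
          (List.rdropWhile_prefix _ _).length_le
        rw [List.length_append] at hlen3
        simp at hlen3
        omega
      have hprobe : probeLoop (pre ++ rest) (↑k) ((pre.length : Int) + ↑j' - 1) (pre ++ rest).length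
          = (k : Int) + L := by
        apply probeLoop_eq
        · omega
        · by_cases hne : L = 0
          · left; omega
          · right
            intro hc
            rw [show ((k : Int) + L) = ((k + 1 + (L - 1) : Nat) : Int) by push_cast; omega,
              haccess (L-1) (by omega), hlastnb hne] at hc
            exact absurd hc (by decide)
        · omega
        · intro i h1 h2
          rw [show i = ((k + 1 + (i - k - 1).toNat : Nat) : Int) by push_cast; omega,
            haccess _ (by omega)]
          exact hblank (i - k - 1).toNat (by omega) (by omega)
        · omega
      rw [hprobe]
      by_cases hne : L = 0
      · have htrimnil : trimmed = [] := by rw [← List.length_eq_zero_iff, ← hL]; omega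
        rw [if_neg (by rw [hne]; intro hc; omega)]
        have hend : endLoop (pre ++ rest) (↑k) ((pre.length : Int) + ↑j') (pre ++ rest).length
            = (k : Int) + 1 := by
          apply endLoop_eq
          · omega
          · left; omega
          · omega
          · intro i h1 h2
            rw [show i - 1 = ((k + 1 + (i - k - 2).toNat : Nat) : Int) by push_cast; omega,
              haccess _ (by omega)]
            exact hblank (i - k - 2).toNat (by omega) (by omega)
          · omega
        rw [hend, htrimnil]
        simp
        omega
      · simp only [hglast hne]
        have eprobe : ((k : Int) + L) = ((k + 1 + (L - 1) : Nat) : Int) := by push_cast; omega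
        by_cases hdash : PySem.Str.strip (rest.getD (L-1) "") == "---"
        · rw [if_pos ⟨by omega, by rw [eprobe, haccess (L-1) (by omega)]; simpa using hdash⟩]
          rw [if_pos (by simpa using hdash)]
          rw [show ((k:Int) + L) = (pre.length : Int) + (trimmed.dropLast.length : Int) by
            rw [List.length_dropLast]; push_cast; omega]
        · rw [if_neg (by
            intro hc
            rw [eprobe, haccess (L-1) (by omega)] at hc
            exact hdash hc.2)]
          rw [if_neg (by simpa using hdash)]
          have hend : endLoop (pre ++ rest) (↑k) ((pre.length : Int) + ↑j') (pre ++ rest).length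
              = (k : Int) + 1 + L := by
            apply endLoop_eq
            · omega
            · right
              intro hc
              rw [show ((k : Int) + 1 + L - 1) = ((k + 1 + (L - 1) : Nat) : Int) by push_cast; omega,
                haccess (L-1) (by omega), hlastnb hne] at hc
              exact absurd hc (by decide)
            · omega
            · intro i h1 h2
              rw [show i - 1 = ((k + 1 + (i - k - 2).toNat : Nat) : Int) by push_cast; omega,
                haccess _ (by omega)]
              exact hblank (i - k - 2).toNat (by omega) (by omega)
            · omega
          rw [hend]
          rw [show ((k:Int) + 1 + L) = (pre.length : Int) + (L : Int) by omega]

-- ===== VERDICT (by name: the statement is the Claim_ definition above) =====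
theorem section_bounds_py_spec : Claim_equal_section_bounds_py := by
  intro lines heading _
  unfold Spec_section_bounds_py
  exact main_eq lines heading
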